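-- pv_equiv track=rewrite | github.com/Lucid-MA/LucidMA | Reporting/Price/bb_fetch_processor.py | lucid_rating
-- ===== SOURCE A (Python) =====
-- def lucid_rating(sp, moodys, fitch, kroll, dbrs, ej, issuer, sectype):
--     # check edge cases
--     if sectype[:9] == "Agncy CMO" or sectype[:10] == "Agncy CMBS":
--         return "USGCMO"
--     elif (
--         sectype[:10] == "US GOVERNM"
--         or issuer[:10] == "Fannie Mae"
--         or issuer[:11] == "Freddie Mac"
--         or issuer[:28] == "Government National Mortgage"
--         or sectype[:3] == "SBA"
--     ):
--         if not (
--             issuer[-5:] == "STACR"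
--             or issuer[-3:] == "CRT"
--             or issuer == "Fannie Mae - CAS"
--         ):  # check if CRT
--             return "USG"
--
--     # check other ratings not moody's
--     # for x in {sp, fitch, kroll, dbrs, ej}:
--     #    if str(x)[-1:] in {'1', '2', '3'}:
--     #        return "Error: Moody's rating where it shouldn't be"
--
--     rmap = lambda x: (
--         0
--         if x[:3] == "AAA"
--         else (
--             1
--             if x[:2] == "AA"
--             else (
--                 2
--                 if x[:1] == "A"
--                 else (
--                     3
--                     if (x[:3] == "BBB" or x[:3] == "BAA")
--                     else 4 if (x[:2] == "BB" or x[:2] == "BA") else 5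
--                 )
--             )
--         )
--     )
--
--     ratingsindex = [
--         rmap(x.upper())
--         for x in [sp[3:] if sp[:3] == "(P)" else sp, moodys, fitch, kroll, dbrs, ej]
--     ]
--     return ["AAA", "AA", "A", "BBB", "BB", "NR"][min(ratingsindex)]
-- ===== SOURCE B (Python) =====
-- def lucid_rating(sp, moodys, fitch, kroll, dbrs, ej, issuer, sectype):
--     # check edge cases (kept byte-for-byte from the original)
--     if sectype[:9] == "Agncy CMO" or sectype[:10] == "Agncy CMBS":
--         return "USGCMO"
--     elif (
--         sectype[:10] == "US GOVERNM"
--         or issuer[:10] == "Fannie Mae"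
--         or issuer[:11] == "Freddie Mac"
--         or issuer[:28] == "Government National Mortgage"
--         or sectype[:3] == "SBA"
--     ):
--         if not (
--             issuer[-5:] == "STACR"
--             or issuer[-3:] == "CRT"
--             or issuer == "Fannie Mae - CAS"
--         ):  # check if CRT
--             return "USG"
--
--     # tier-major scan: walk the rating tiers in priority order and return the first
--     # tier some agency string hits, instead of classifying each agency into an
--     # index and taking the minimum
--     base = sp[3:] if sp[:3] == "(P)" else sp
--     ratings = [x.upper() for x in (base, moodys, fitch, kroll, dbrs, ej)]
--     for prefixes, label in (
--         (("AAA",), "AAA"),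
--         (("AA",), "AA"),
--         (("A",), "A"),
--         (("BBB", "BAA"), "BBB"),
--         (("BB", "BA"), "BB"),
--     ):
--         if any(x.startswith(prefixes) for x in ratings):
--             return label
--     return "NR"
-- ===== Notes on version B (the rewrite author's own statement) =====
-- stated objective: alternative
-- what changed: The rating logic is transposed: instead of classifying each of the six agency strings into a numeric tier index and indexing a label table by the minimum, B scans the five tiers in priority order and returns the first tier whose prefix set matches any agency string; the USGCMO/USG guard block is kept verbatim.
import Mathlib
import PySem

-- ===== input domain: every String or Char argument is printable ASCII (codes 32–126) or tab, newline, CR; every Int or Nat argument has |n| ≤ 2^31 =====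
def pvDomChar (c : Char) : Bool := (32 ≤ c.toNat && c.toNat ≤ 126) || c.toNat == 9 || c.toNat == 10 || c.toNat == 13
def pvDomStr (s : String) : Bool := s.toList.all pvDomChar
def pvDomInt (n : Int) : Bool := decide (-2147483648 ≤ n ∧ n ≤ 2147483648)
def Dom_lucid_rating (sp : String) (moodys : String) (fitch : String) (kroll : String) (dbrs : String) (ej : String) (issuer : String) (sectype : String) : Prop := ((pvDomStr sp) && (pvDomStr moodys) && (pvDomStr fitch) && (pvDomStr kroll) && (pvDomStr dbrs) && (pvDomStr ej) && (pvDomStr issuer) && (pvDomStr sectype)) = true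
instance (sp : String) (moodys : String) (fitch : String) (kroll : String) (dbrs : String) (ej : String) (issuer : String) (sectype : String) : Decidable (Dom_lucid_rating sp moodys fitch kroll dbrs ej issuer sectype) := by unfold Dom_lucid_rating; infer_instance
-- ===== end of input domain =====

-- B re-states the rating scan tier-major (scan the five rating tiers in priority order and
-- return on the first prefix hit over all six agency strings) instead of A's per-agency
-- classification into an index followed by min; objective: alternative decomposition, same cost.

-- ===== PORT A =====

-- A's `rmap` lambda: nested conditional on string prefixes (x[:3] == "AAA", …)
def lucidRmap (x : String) : Int :=
  if PySem.Str.slice x none (some 3) == "AAA" then 0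
  else if PySem.Str.slice x none (some 2) == "AA" then 1
  else if PySem.Str.slice x none (some 1) == "A" then 2
  else if (PySem.Str.slice x none (some 3) == "BBB" || PySem.Str.slice x none (some 3) == "BAA") then 3
  else if (PySem.Str.slice x none (some 2) == "BB" || PySem.Str.slice x none (some 2) == "BA") then 4
  else 5

-- A's rating tail: build ratingsindex, then ["AAA","AA","A","BBB","BB","NR"][min(ratingsindex)].
-- The list has six elements so min() never raises (min? is always some) and every lucidRmap value
-- lies in [0,5], so the Python indexing never raises either: the getD defaults are never used.
def lucidRatingTail (sp : String) (moodys : String) (fitch : String) (kroll : String) (dbrs : String) (ej : String) : String :=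
  let ratingsindex :=
    [(if PySem.Str.slice sp none (some 3) == "(P)" then PySem.Str.slice sp (some 3) none else sp),
      moodys, fitch, kroll, dbrs, ej].map (fun x => lucidRmap (PySem.Str.upper x))
  PySem.List.pyGetD ["AAA", "AA", "A", "BBB", "BB", "NR"]
    ((PySem.List.min? ratingsindex (fun y => y)).getD 0) ""

def lucid_rating (sp : String) (moodys : String) (fitch : String) (kroll : String) (dbrs : String) (ej : String) (issuer : String) (sectype : String) : String :=
  if PySem.Str.slice sectype none (some 9) == "Agncy CMO"
      || PySem.Str.slice sectype none (some 10) == "Agncy CMBS" then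
    "USGCMO"
  else if PySem.Str.slice sectype none (some 10) == "US GOVERNM"
      || PySem.Str.slice issuer none (some 10) == "Fannie Mae"
      || PySem.Str.slice issuer none (some 11) == "Freddie Mac"
      || PySem.Str.slice issuer none (some 28) == "Government National Mortgage"
      || PySem.Str.slice sectype none (some 3) == "SBA" then
    -- Python's nested `if not (...): return "USG"` falls through to the rating code otherwise
    if !(PySem.Str.slice issuer (some (-5)) none == "STACR"
        || PySem.Str.slice issuer (some (-3)) none == "CRT"
        || issuer == "Fannie Mae - CAS") then
      "USG"
    else
      lucidRatingTail sp moodys fitch kroll dbrs ej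
  else
    lucidRatingTail sp moodys fitch kroll dbrs ej

-- ===== PORT B =====

-- B's tier table: prefixes and the letter returned on a hit, in priority order
def lucidTiers : List (List String × String) :=
  [(["AAA"], "AAA"), (["AA"], "AA"), (["A"], "A"), (["BBB", "BAA"], "BBB"), (["BB", "BA"], "BB")]

-- B's tier-major loop: first tier for which ANY of the six strings starts with one of its prefixes
def lucidScanTiers (tiers : List (List String × String)) (l : List String) : String :=
  match tiers with
  | [] => "NR"
  | (ps, lab) :: rest =>
    if l.any (fun x => ps.any (fun p => PySem.Str.startswith x p)) then lab
    else lucidScanTiers rest l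

def lucidRatingTailAlt (sp : String) (moodys : String) (fitch : String) (kroll : String) (dbrs : String) (ej : String) : String :=
  let base := if PySem.Str.slice sp none (some 3) == "(P)" then PySem.Str.slice sp (some 3) none else sp
  lucidScanTiers lucidTiers ([base, moodys, fitch, kroll, dbrs, ej].map PySem.Str.upper)

def lucid_rating_alt (sp : String) (moodys : String) (fitch : String) (kroll : String) (dbrs : String) (ej : String) (issuer : String) (sectype : String) : String :=
  if PySem.Str.slice sectype none (some 9) == "Agncy CMO"
      || PySem.Str.slice sectype none (some 10) == "Agncy CMBS" then
    "USGCMO"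
  else if PySem.Str.slice sectype none (some 10) == "US GOVERNM"
      || PySem.Str.slice issuer none (some 10) == "Fannie Mae"
      || PySem.Str.slice issuer none (some 11) == "Freddie Mac"
      || PySem.Str.slice issuer none (some 28) == "Government National Mortgage"
      || PySem.Str.slice sectype none (some 3) == "SBA" then
    if !(PySem.Str.slice issuer (some (-5)) none == "STACR"
        || PySem.Str.slice issuer (some (-3)) none == "CRT"
        || issuer == "Fannie Mae - CAS") then
      "USG"
    else
      lucidRatingTailAlt sp moodys fitch kroll dbrs ej
  else
    lucidRatingTailAlt sp moodys fitch kroll dbrs ej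

-- ===== PRECONDITION & SPEC =====
def Spec_lucid_rating (sp : String) (moodys : String) (fitch : String) (kroll : String) (dbrs : String) (ej : String) (issuer : String) (sectype : String) (out : String) : Prop := out = lucid_rating_alt sp moodys fitch kroll dbrs ej issuer sectype
instance (sp : String) (moodys : String) (fitch : String) (kroll : String) (dbrs : String) (ej : String) (issuer : String) (sectype : String) (out : String) : Decidable (Spec_lucid_rating sp moodys fitch kroll dbrs ej issuer sectype out) := by unfold Spec_lucid_rating; infer_instance

-- ===== CLAIM (what is proved, stated in full; the proofs are below) =====
def Claim_equal_lucid_rating : Prop := ∀ (sp : String) (moodys : String) (fitch : String) (kroll : String) (dbrs : String) (ej : String) (issuer : String) (sectype : String), Dom_lucid_rating sp moodys fitch kroll dbrs ej issuer sectype → Spec_lucid_rating sp moodys fitch kroll dbrs ej issuer sectype (lucid_rating sp moodys fitch kroll dbrs ej issuer sectype)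

-- ===== LEMMAS AND PROOFS =====

-- lucidRmap depends only on the character list; rmapL is that list-level view
def rmapL (l : List Char) : Int :=
  if l.take 3 = ['A','A','A'] then 0
  else if l.take 2 = ['A','A'] then 1
  else if l.take 1 = ['A'] then 2
  else if (l.take 3 = ['B','B','B'] ∨ l.take 3 = ['B','A','A']) then 3
  else if (l.take 2 = ['B','B'] ∨ l.take 2 = ['B','A']) then 4
  else 5

lemma slice_take (s : String) (k : Int) (hk : 0 ≤ k) (t : String) :
    (PySem.Str.slice s none (some k) = t) ↔ s.toList.take k.toNat = t.toList := by
  simp only [← String.toList_inj, PySem.Str.toList_slice, PySem.Chars.slice_eq_listSlice]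
  rw [PySem.List.slice_to _ hk]

lemma lucidRmap_eq (u : String) : lucidRmap u = rmapL u.toList := by
  unfold lucidRmap rmapL
  simp only [Bool.or_eq_true, beq_iff_eq, slice_take u 3 (by norm_num),
    slice_take u 2 (by norm_num), slice_take u 1 (by norm_num)]
  rfl

lemma sw (s t : String) : (PySem.Str.startswith s t = true) ↔ t.toList <+: s.toList := by
  rw [PySem.Str.startswith_eq, PySem.Chars.startswith_iff]

lemma rmapL_bounds (l : List Char) : 0 ≤ rmapL l ∧ rmapL l ≤ 5 := by
  unfold rmapL; split_ifs <;> omega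

lemma tier0 (l : List Char) : ("AAA".toList <+: l) ↔ rmapL l = 0 := by
  unfold rmapL
  rcases l with _ | ⟨a, _ | ⟨b, _ | ⟨c, t⟩⟩⟩ <;>
    simp [List.cons_prefix_cons] <;> split_ifs <;> simp_all <;> first | omega | tauto

lemma tier1 (l : List Char) : ("AA".toList <+: l) ↔ rmapL l ≤ 1 := by
  unfold rmapL
  rcases l with _ | ⟨a, _ | ⟨b, _ | ⟨c, t⟩⟩⟩ <;>
    simp [List.cons_prefix_cons] <;> split_ifs <;> simp_all <;> first | omega | tauto

lemma tier2 (l : List Char) : ("A".toList <+: l) ↔ rmapL l ≤ 2 := by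
  unfold rmapL
  rcases l with _ | ⟨a, _ | ⟨b, _ | ⟨c, t⟩⟩⟩ <;>
    simp [List.cons_prefix_cons] <;> split_ifs <;> simp_all <;> first | omega | tauto

lemma tier3 (l : List Char) : ("BBB".toList <+: l ∨ "BAA".toList <+: l) ↔ rmapL l = 3 := by
  unfold rmapL
  rcases l with _ | ⟨a, _ | ⟨b, _ | ⟨c, t⟩⟩⟩ <;>
    simp [List.cons_prefix_cons] <;> split_ifs <;> simp_all <;> first | omega | tauto

lemma tier4 (l : List Char) : ("BB".toList <+: l ∨ "BA".toList <+: l) ↔ (3 ≤ rmapL l ∧ rmapL l ≤ 4) := by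
  unfold rmapL
  rcases l with _ | ⟨a, _ | ⟨b, _ | ⟨c, t⟩⟩⟩ <;>
    simp [List.cons_prefix_cons] <;> split_ifs <;> simp_all <;> first | omega | tauto

-- String-level forms, shaped like the conditions of lucidScanTiers
lemma s0 (x : String) : (PySem.Str.startswith x "AAA" = true) ↔ rmapL x.toList = 0 := by
  rw [sw, tier0]
lemma s1 (x : String) : (PySem.Str.startswith x "AA" = true) ↔ rmapL x.toList ≤ 1 := by
  rw [sw, tier1]
lemma s2 (x : String) : (PySem.Str.startswith x "A" = true) ↔ rmapL x.toList ≤ 2 := by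
  rw [sw, tier2]
lemma s3 (x : String) : (PySem.Str.startswith x "BBB" = true ∨ PySem.Str.startswith x "BAA" = true) ↔ rmapL x.toList = 3 := by
  rw [sw, sw, tier3]
lemma s4 (x : String) : (PySem.Str.startswith x "BB" = true ∨ PySem.Str.startswith x "BA" = true) ↔ (3 ≤ rmapL x.toList ∧ rmapL x.toList ≤ 4) := by
  rw [sw, sw, tier4]

lemma min6 (r1 r2 r3 r4 r5 r6 : Int) :
    PySem.List.min? [r1, r2, r3, r4, r5, r6] (fun y => y) = some (min (min (min (min (min r1 r2) r3) r4) r5) r6) := by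
  rw [PySem.List.min?_id_cons]
  simp only [List.foldl_cons, List.foldl_nil]

-- the arithmetic heart: label of the minimum index = first tier any index satisfies
lemma combine (r1 r2 r3 r4 r5 r6 : Int)
    (h1 : 0 ≤ r1 ∧ r1 ≤ 5) (h2 : 0 ≤ r2 ∧ r2 ≤ 5) (h3 : 0 ≤ r3 ∧ r3 ≤ 5)
    (h4 : 0 ≤ r4 ∧ r4 ≤ 5) (h5 : 0 ≤ r5 ∧ r5 ≤ 5) (h6 : 0 ≤ r6 ∧ r6 ≤ 5) :
    PySem.List.pyGetD ["AAA", "AA", "A", "BBB", "BB", "NR"]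
        ((PySem.List.min? [r1, r2, r3, r4, r5, r6] (fun y => y)).getD 0) "" =
      (if r1 = 0 ∨ r2 = 0 ∨ r3 = 0 ∨ r4 = 0 ∨ r5 = 0 ∨ r6 = 0 then "AAA"
      else if r1 ≤ 1 ∨ r2 ≤ 1 ∨ r3 ≤ 1 ∨ r4 ≤ 1 ∨ r5 ≤ 1 ∨ r6 ≤ 1 then "AA"
      else if r1 ≤ 2 ∨ r2 ≤ 2 ∨ r3 ≤ 2 ∨ r4 ≤ 2 ∨ r5 ≤ 2 ∨ r6 ≤ 2 then "A"
      else if r1 = 3 ∨ r2 = 3 ∨ r3 = 3 ∨ r4 = 3 ∨ r5 = 3 ∨ r6 = 3 then "BBB"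
      else if (3 ≤ r1 ∧ r1 ≤ 4) ∨ (3 ≤ r2 ∧ r2 ≤ 4) ∨ (3 ≤ r3 ∧ r3 ≤ 4) ∨ (3 ≤ r4 ∧ r4 ≤ 4) ∨ (3 ≤ r5 ∧ r5 ≤ 4) ∨ (3 ≤ r6 ∧ r6 ≤ 4) then "BB"
      else "NR") := by
  rw [min6]
  simp only [Option.getD_some]
  split_ifs with g0 g1 g2 g3 g4
  · rw [show min (min (min (min (min r1 r2) r3) r4) r5) r6 = 0 by omega]; decide
  · rw [show min (min (min (min (min r1 r2) r3) r4) r5) r6 = 1 by omega]; decide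
  · rw [show min (min (min (min (min r1 r2) r3) r4) r5) r6 = 2 by omega]; decide
  · rw [show min (min (min (min (min r1 r2) r3) r4) r5) r6 = 3 by omega]; decide
  · rw [show min (min (min (min (min r1 r2) r3) r4) r5) r6 = 4 by omega]; decide
  · rw [show min (min (min (min (min r1 r2) r3) r4) r5) r6 = 5 by omega]; decide

lemma tail_eq (sp moodys fitch kroll dbrs ej : String) :
    lucidRatingTail sp moodys fitch kroll dbrs ej = lucidRatingTailAlt sp moodys fitch kroll dbrs ej := by
  unfold lucidRatingTail lucidRatingTailAlt
  simp only [List.map_cons, List.map_nil, lucidRmap_eq]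
  simp only [lucidScanTiers, lucidTiers, List.any_cons, List.any_nil, Bool.or_false,
    Bool.or_eq_true, s0, s1, s2, s3, s4]
  exact combine _ _ _ _ _ _ (rmapL_bounds _) (rmapL_bounds _) (rmapL_bounds _)
    (rmapL_bounds _) (rmapL_bounds _) (rmapL_bounds _)

-- ===== VERDICT (by name: the statement is the Claim_ definition above) =====
theorem lucid_rating_spec : Claim_equal_lucid_rating := by
  intro sp moodys fitch kroll dbrs ej issuer sectype _
  unfold Spec_lucid_rating lucid_rating lucid_rating_alt
  split_ifs with h1 h2 h3
  · rfl
  · rfl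
  · exact tail_eq sp moodys fitch kroll dbrs ej
  · exact tail_eq sp moodys fitch kroll dbrs ej
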